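-- pv_equiv track=rewrite | github.com/montana2ab/poker | src/holdem/abstraction/postflop_features.py | _count_straight_outs
-- ===== SOURCE A (Python) =====
-- from typing import List, Tuple, Optional
--
-- def _has_straight(unique_ranks: List[int]) -> bool:
--     """Check if ranks contain a straight."""
--     if len(unique_ranks) < 5:
--         return False
--
--     # Check normal straights
--     for i in range(len(unique_ranks) - 4):
--         if unique_ranks[i] - unique_ranks[i+4] == 4:
--             return True
--
--     # Check wheel (A-2-3-4-5)
--     if 14 in unique_ranks and set([2, 3, 4, 5]).issubset(set(unique_ranks)):
--         return True
--
--     return False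
--
-- def _count_straight_outs(unique_ranks: List[int]) -> int:
--     """Count approximate number of outs to make a straight."""
--     outs = 0
--
--     # For each possible rank we could add
--     for new_rank in range(2, 15):
--         if new_rank in unique_ranks:
--             continue
--
--         test_ranks = sorted(set(unique_ranks + [new_rank]), reverse=True)
--         if _has_straight(test_ranks):
--             outs += 4  # 4 cards of each rank
--
--     return outs
-- ===== SOURCE B (Python) =====
-- def _count_straight_outs(unique_ranks):
--     """Count approximate number of outs to make a straight (window-based)."""
--     present = set(unique_ranks)
--
--     def completes(r):
--         # wheel A-2-3-4-5 with r added
--         if all(v in present for v in (14, 2, 3, 4, 5) if v != r):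
--             return True
--         # any 5-window {s..s+4} contained in present | {r}; its start s must
--         # lie in present or within 4 below r
--         for s in list(present) + [r - 4, r - 3, r - 2, r - 1, r]:
--             if all(v == r or v in present for v in range(s, s + 5)):
--                 return True
--         return False
--
--     return 4 * sum(1 for r in range(2, 15) if r not in present and completes(r))
-- ===== Notes on version B (the rewrite author's own statement) =====
-- stated objective: faster
-- what changed: Replaces the per-candidate rebuild-sort-and-scan (sorted(set(ranks+[r])) followed by a sliding-window scan over the sorted list) with a direct window test against a membership set built once: a candidate rank r is an out iff some 5-rank window {s..s+4} (or the wheel) lies inside present|{r}; no sorting at all.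
import Mathlib
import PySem

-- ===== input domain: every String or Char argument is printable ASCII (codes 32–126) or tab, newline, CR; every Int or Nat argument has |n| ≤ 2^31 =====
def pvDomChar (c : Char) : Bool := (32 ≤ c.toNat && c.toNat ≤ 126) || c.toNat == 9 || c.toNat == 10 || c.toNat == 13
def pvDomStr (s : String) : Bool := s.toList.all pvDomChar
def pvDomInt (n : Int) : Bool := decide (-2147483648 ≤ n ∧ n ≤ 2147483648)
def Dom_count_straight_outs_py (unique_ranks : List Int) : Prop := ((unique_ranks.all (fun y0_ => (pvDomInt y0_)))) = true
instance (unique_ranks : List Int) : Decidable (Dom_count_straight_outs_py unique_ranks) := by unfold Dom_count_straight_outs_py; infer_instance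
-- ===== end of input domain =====

-- B replaces A's per-candidate rebuild+sort+scan with direct 5-rank-window containment tests
-- against a membership set built once (objective: faster — it never sorts).

-- ===== PORT A =====
-- _has_straight: guard len<5, scan sorted-descending list for a 4-gap window, then wheel check.
def has_straight_py (L : List Int) : Bool :=
  if L.length < 5 then false
  else if (PySem.List.pyRange 0 ((L.length : Int) - 4)).any
      (fun i => PySem.List.pyGetD L i 0 - PySem.List.pyGetD L (i + 4) 0 == 4) then true
  else if L.contains 14 && (PySem.Set.ofList ([2, 3, 4, 5] : List Int)).issubset (PySem.Set.ofList L) then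
    true
  else false

def count_straight_outs_py (unique_ranks : List Int) : Int :=
  (PySem.List.pyRange 2 15).foldl
    (fun outs r =>
      if unique_ranks.contains r then outs
      else
        if has_straight_py (PySem.List.sorted (PySem.Set.ofList (unique_ranks ++ [r])) (fun x => x) true) then
          outs + 4
        else outs) 0

-- ===== PORT B =====
-- completes r: wheel minus r in present, or some window {s..s+4} inside present ∪ {r}.
def completes_alt (present : List Int) (r : Int) : Bool :=
  if ([14, 2, 3, 4, 5] : List Int).all (fun v => v == r || present.contains v) then true
  else
    (present ++ [r - 4, r - 3, r - 2, r - 1, r]).any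
      (fun s => (PySem.List.pyRange s (s + 5)).all (fun v => v == r || present.contains v))

def count_straight_outs_py_alt (unique_ranks : List Int) : Int :=
  let present := PySem.Set.ofList unique_ranks
  4 * ((PySem.List.pyRange 2 15).map
        (fun r => if !present.contains r && completes_alt present r then (1 : Int) else 0)).sum

-- ===== PRECONDITION & SPEC =====
def Spec_count_straight_outs_py (unique_ranks : List Int) (out : Int) : Prop := out = count_straight_outs_py_alt unique_ranks
instance (unique_ranks : List Int) (out : Int) : Decidable (Spec_count_straight_outs_py unique_ranks out) := by unfold Spec_count_straight_outs_py; infer_instance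

-- ===== CLAIM (what is proved, stated in full; the proofs are below) =====
def Claim_equal_count_straight_outs_py : Prop := ∀ (unique_ranks : List Int), Dom_count_straight_outs_py unique_ranks → Spec_count_straight_outs_py unique_ranks (count_straight_outs_py unique_ranks)

-- ===== LEMMAS AND PROOFS =====

-- the sorted-descending dedup list A builds for candidate r
def pvL (ur : List Int) (r : Int) : List Int :=
  PySem.List.sorted (PySem.Set.ofList (ur ++ [r])) (fun x => x) true

-- membership predicate "x ∈ ranks ∪ {r}"
def pvP (ur : List Int) (r x : Int) : Prop := x ∈ ur ∨ x = r

-- "some 5-window is contained in ranks ∪ {r}"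
def pvN (ur : List Int) (r : Int) : Prop :=
  ∃ s : Int, pvP ur r s ∧ pvP ur r (s + 1) ∧ pvP ur r (s + 2) ∧ pvP ur r (s + 3) ∧ pvP ur r (s + 4)

-- "the wheel is contained in ranks ∪ {r}"
def pvW (ur : List Int) (r : Int) : Prop :=
  pvP ur r 14 ∧ pvP ur r 2 ∧ pvP ur r 3 ∧ pvP ur r 4 ∧ pvP ur r 5

lemma mem_pvL (ur : List Int) (r x : Int) : x ∈ pvL ur r ↔ pvP ur r x := by
  simp [pvL, pvP, PySem.List.mem_sorted, PySem.Set.mem_ofList]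

lemma nodup_pvL (ur : List Int) (r : Int) : (pvL ur r).Nodup :=
  ((PySem.List.sorted_perm _ _ _).nodup_iff).mpr (PySem.Set.nodup_ofList _)

lemma strict_pvL (ur : List Int) (r : Int) : (pvL ur r).Pairwise (fun a b => b < a) := by
  have h1 : (pvL ur r).Pairwise (fun a b : Int => b ≤ a) :=
    PySem.List.sorted_pairwise_rev _ _
  have h2 := (nodup_pvL ur r).and h1
  exact h2.imp (fun {a b} h => lt_of_le_of_ne h.2 (Ne.symm h.1))

lemma pvL_getD_lt (ur : List Int) (r : Int) {i j : Nat} (hij : i < j)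
    (hj : j < (pvL ur r).length) : (pvL ur r).getD j 0 < (pvL ur r).getD i 0 := by
  rw [List.getD_eq_getElem _ _ hj, List.getD_eq_getElem _ _ (by omega)]
  exact (List.pairwise_iff_getElem.mp (strict_pvL ur r)) i j (hij.trans hj) hj hij

lemma pvL_getD_step (ur : List Int) (r : Int) (i : Nat) :
    ∀ d : Nat, i + d < (pvL ur r).length →
      (pvL ur r).getD (i + d) 0 ≤ (pvL ur r).getD i 0 - d := by
  intro d
  induction d with
  | zero => intro h; simp
  | succ d ih =>
      intro h
      have hd : i + d < (pvL ur r).length := by omega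
      have h1 := ih hd
      have h2 : (pvL ur r).getD (i + (d + 1)) 0 < (pvL ur r).getD (i + d) 0 :=
        pvL_getD_lt ur r (by omega) h
      push_cast
      push_cast at h1
      omega

lemma pvL_getD_mem (ur : List Int) (r : Int) {m : Nat} (h : m < (pvL ur r).length) :
    (pvL ur r).getD m 0 ∈ pvL ur r := by
  rw [List.getD_eq_getElem _ _ h]; exact List.getElem_mem h

lemma pvL_getD_idxOf (ur : List Int) (r : Int) {x : Int} (hx : x ∈ pvL ur r) :
    (pvL ur r).getD ((pvL ur r).idxOf x) 0 = x := by
  rw [List.getD_eq_getElem _ _ (List.idxOf_lt_length_of_mem hx)]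
  exact List.getElem_idxOf _

lemma pvL_idx_lt (ur : List Int) (r : Int) {x y : Int} (hx : x ∈ pvL ur r)
    (hy : y ∈ pvL ur r) (hxy : y < x) :
    (pvL ur r).idxOf x < (pvL ur r).idxOf y := by
  have hxl := List.idxOf_lt_length_of_mem hx
  have hyl := List.idxOf_lt_length_of_mem hy
  rcases lt_trichotomy ((pvL ur r).idxOf x) ((pvL ur r).idxOf y) with h | h | h
  · exact h
  · exfalso
    have h1 := pvL_getD_idxOf ur r hx
    rw [h, pvL_getD_idxOf ur r hy] at h1
    omega
  · exfalso
    have := pvL_getD_lt ur r h hxl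
    rw [pvL_getD_idxOf ur r hx, pvL_getD_idxOf ur r hy] at this
    omega

-- A's inner scan finds a 4-gap window iff some 5 consecutive ranks are all present
lemma scan_iff_window (ur : List Int) (r : Int) :
    ((PySem.List.pyRange 0 (((pvL ur r).length : Int) - 4)).any
      (fun i => PySem.List.pyGetD (pvL ur r) i 0 - PySem.List.pyGetD (pvL ur r) (i + 4) 0 == 4)) = true
      ↔ pvN ur r := by
  rw [List.any_eq_true]
  constructor
  · rintro ⟨i, hi, hcond⟩
    rw [PySem.List.mem_pyRange_one] at hi
    obtain ⟨h0, h4⟩ := hi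
    set n := i.toNat with hn
    have hlen : n + 4 < (pvL ur r).length := by omega
    have hi' : i = (n : Int) := by omega
    have hi4 : ((n : Int)) + 4 = ((n + 4 : Nat) : Int) := by push_cast; ring
    rw [hi', hi4, PySem.List.pyGetD_natCast, PySem.List.pyGetD_natCast] at hcond
    have hdiff : (pvL ur r).getD n 0 - (pvL ur r).getD (n + 4) 0 = 4 := by
      simpa using hcond
    have s1 : (pvL ur r).getD (n + 1) 0 < (pvL ur r).getD (n + 0) 0 := pvL_getD_lt ur r (by omega) (by omega)
    have s2 : (pvL ur r).getD (n + 2) 0 < (pvL ur r).getD (n + 1) 0 := pvL_getD_lt ur r (by omega) (by omega)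
    have s3 : (pvL ur r).getD (n + 3) 0 < (pvL ur r).getD (n + 2) 0 := pvL_getD_lt ur r (by omega) (by omega)
    have s4 : (pvL ur r).getD (n + 4) 0 < (pvL ur r).getD (n + 3) 0 := pvL_getD_lt ur r (by omega) hlen
    have e0 : (pvL ur r).getD (n + 0) 0 = (pvL ur r).getD n 0 := by norm_num
    refine ⟨(pvL ur r).getD (n + 4) 0, ?_, ?_, ?_, ?_, ?_⟩ <;> rw [← mem_pvL ur r]
    · exact pvL_getD_mem ur r hlen
    · have h : (pvL ur r).getD (n + 4) 0 + 1 = (pvL ur r).getD (n + 3) 0 := by omega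
      rw [h]; exact pvL_getD_mem ur r (by omega)
    · have h : (pvL ur r).getD (n + 4) 0 + 2 = (pvL ur r).getD (n + 2) 0 := by omega
      rw [h]; exact pvL_getD_mem ur r (by omega)
    · have h : (pvL ur r).getD (n + 4) 0 + 3 = (pvL ur r).getD (n + 1) 0 := by omega
      rw [h]; exact pvL_getD_mem ur r (by omega)
    · have h : (pvL ur r).getD (n + 4) 0 + 4 = (pvL ur r).getD n 0 := by omega
      rw [h]; exact pvL_getD_mem ur r (by omega)
  · rintro ⟨s, p0, p1, p2, p3, p4⟩
    rw [← mem_pvL ur r] at p0 p1 p2 p3 p4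
    have c01 := pvL_idx_lt ur r p1 p0 (by omega)
    have c12 := pvL_idx_lt ur r p2 p1 (by omega)
    have c23 := pvL_idx_lt ur r p3 p2 (by omega)
    have c34 := pvL_idx_lt ur r p4 p3 (by omega)
    have hlen0 : (pvL ur r).idxOf s < (pvL ur r).length := List.idxOf_lt_length_of_mem p0
    set n := (pvL ur r).idxOf (s + 4) with hn
    have hn4 : n + 4 < (pvL ur r).length := by omega
    have hLn : (pvL ur r).getD n 0 = s + 4 := pvL_getD_idxOf ur r p4
    have hub : (pvL ur r).getD (n + 4) 0 ≤ (pvL ur r).getD n 0 - 4 := by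
      have := pvL_getD_step ur r n 4 hn4
      simpa using this
    have hlb : s ≤ (pvL ur r).getD (n + 4) 0 := by
      rcases Nat.lt_or_ge (n + 4) ((pvL ur r).idxOf s) with h | h
      · have := pvL_getD_lt ur r h hlen0
        rw [pvL_getD_idxOf ur r p0] at this
        omega
      · have heq : n + 4 = (pvL ur r).idxOf s := by omega
        rw [heq, pvL_getD_idxOf ur r p0]
    refine ⟨(n : Int), ?_, ?_⟩
    · rw [PySem.List.mem_pyRange_one]
      constructor
      · exact_mod_cast Nat.zero_le n
      · omega
    · have e1 : ((n : Int) + 4) = ((n + 4 : Nat) : Int) := by push_cast; ring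
      rw [e1, PySem.List.pyGetD_natCast, PySem.List.pyGetD_natCast]
      have h : (pvL ur r).getD n 0 - (pvL ur r).getD (n + 4) 0 = 4 := by omega
      simpa using h

-- length ≥ 5 whenever five distinct ranks are all in L
lemma pvL_len5_of_window (ur : List Int) (r : Int) (h : pvN ur r) :
    ¬ (pvL ur r).length < 5 := by
  obtain ⟨s, p0, p1, p2, p3, p4⟩ := h
  rw [← mem_pvL ur r] at p0 p1 p2 p3 p4
  have c01 := pvL_idx_lt ur r p1 p0 (by omega)
  have c12 := pvL_idx_lt ur r p2 p1 (by omega)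
  have c23 := pvL_idx_lt ur r p3 p2 (by omega)
  have c34 := pvL_idx_lt ur r p4 p3 (by omega)
  have := List.idxOf_lt_length_of_mem p0
  omega

lemma pvL_len5_of_wheel (ur : List Int) (r : Int) (h : pvW ur r) :
    ¬ (pvL ur r).length < 5 := by
  obtain ⟨p14, p2, p3, p4, p5⟩ := h
  rw [← mem_pvL ur r] at p14 p2 p3 p4 p5
  have c1 := pvL_idx_lt ur r p14 p5 (by omega)
  have c2 := pvL_idx_lt ur r p5 p4 (by omega)
  have c3 := pvL_idx_lt ur r p4 p3 (by omega)
  have c4 := pvL_idx_lt ur r p3 p2 (by omega)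
  have := List.idxOf_lt_length_of_mem p2
  omega

lemma wheel_iff (ur : List Int) (r : Int) :
    (((pvL ur r).contains 14) &&
      (PySem.Set.ofList ([2, 3, 4, 5] : List Int)).issubset (PySem.Set.ofList (pvL ur r))) = true
    ↔ pvW ur r := by
  rw [Bool.and_eq_true, PySem.Set.issubset_iff]
  simp only [List.contains_eq_mem, decide_eq_true_eq, PySem.Set.mem_ofList, mem_pvL]
  constructor
  · rintro ⟨h14, hsub⟩
    exact ⟨h14, hsub 2 (by simp), hsub 3 (by simp), hsub 4 (by simp), hsub 5 (by simp)⟩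
  · rintro ⟨h14, h2, h3, h4, h5⟩
    refine ⟨h14, ?_⟩
    intro x hx
    fin_cases hx <;> assumption

lemma hasA_iff (ur : List Int) (r : Int) :
    has_straight_py (pvL ur r) = true ↔ (pvN ur r ∨ pvW ur r) := by
  unfold has_straight_py
  split_ifs with h5 hscan hwheel
  · simp only [false_iff]
    rintro (hN | hW)
    · exact pvL_len5_of_window ur r hN h5
    · exact pvL_len5_of_wheel ur r hW h5
  · simp only [true_iff]
    exact Or.inl ((scan_iff_window ur r).mp hscan)
  · simp only [true_iff]
    exact Or.inr ((wheel_iff ur r).mp hwheel)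
  · simp only [false_iff]
    rintro (hN | hW)
    · exact hscan ((scan_iff_window ur r).mpr hN)
    · exact hwheel ((wheel_iff ur r).mpr hW)

lemma completes_iff (ur : List Int) (r : Int) :
    completes_alt (PySem.Set.ofList ur) r = true ↔ (pvN ur r ∨ pvW ur r) := by
  unfold completes_alt
  have hmem : ∀ v : Int, (v == r || (PySem.Set.ofList ur).contains v) = true ↔ pvP ur r v := by
    intro v
    simp only [Bool.or_eq_true, beq_iff_eq, PySem.Set.contains_iff, PySem.Set.mem_ofList, pvP]
    tauto
  split_ifs with hwheel
  · simp only [true_iff]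
    right
    rw [List.all_eq_true] at hwheel
    exact ⟨(hmem 14).mp (hwheel 14 (by simp)), (hmem 2).mp (hwheel 2 (by simp)),
      (hmem 3).mp (hwheel 3 (by simp)), (hmem 4).mp (hwheel 4 (by simp)),
      (hmem 5).mp (hwheel 5 (by simp))⟩
  · rw [List.any_eq_true]
    constructor
    · rintro ⟨s, _, hall⟩
      rw [List.all_eq_true] at hall
      left
      refine ⟨s, ?_, ?_, ?_, ?_, ?_⟩ <;>
        · apply (hmem _).mp
          apply hall
          rw [PySem.List.mem_pyRange_one]
          omega
    · rintro (⟨s, p0, p1, p2, p3, p4⟩ | hW)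
      · refine ⟨s, ?_, ?_⟩
        · rw [List.mem_append]
          rcases p0 with hmem' | hr
          · exact Or.inl ((PySem.Set.mem_ofList ur s).mpr hmem')
          · right; simp [hr]
        · rw [List.all_eq_true]
          intro v hv
          rw [PySem.List.mem_pyRange_one] at hv
          apply (hmem v).mpr
          have : v = s ∨ v = s + 1 ∨ v = s + 2 ∨ v = s + 3 ∨ v = s + 4 := by omega
          rcases this with h | h | h | h | h <;> (rw [h]; assumption)
      · exfalso
        apply hwheel
        rw [List.all_eq_true]
        intro v hv
        obtain ⟨h14, h2, h3, h4, h5⟩ := hW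
        fin_cases hv <;> (apply (hmem _).mpr; assumption)

-- per-candidate agreement of the two tests
lemma key_eq (ur : List Int) (r : Int) :
    has_straight_py (pvL ur r) = completes_alt (PySem.Set.ofList ur) r := by
  rw [Bool.eq_iff_iff, hasA_iff, completes_iff]

-- A's foldl computed as 4 · (sum of B's indicators), from any accumulator
lemma foldA_eq (ur : List Int) (l : List Int) (a : Int) :
    l.foldl
      (fun outs r =>
        if ur.contains r then outs
        else
          if has_straight_py (PySem.List.sorted (PySem.Set.ofList (ur ++ [r])) (fun x => x) true) then
            outs + 4
          else outs) a
    = a + 4 * (l.map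
        (fun r => if !(PySem.Set.ofList ur).contains r
            && completes_alt (PySem.Set.ofList ur) r then (1 : Int) else 0)).sum := by
  induction l generalizing a with
  | nil => simp
  | cons r t ih =>
      simp only [List.foldl_cons, List.map_cons, List.sum_cons]
      have hk : has_straight_py (PySem.List.sorted (PySem.Set.ofList (ur ++ [r])) (fun x => x) true)
          = completes_alt (PySem.Set.ofList ur) r := key_eq ur r
      by_cases hmem : r ∈ ur
      · have h1 : ur.contains r = true := by simpa using hmem
        have h2 : (PySem.Set.ofList ur).contains r = true := by
          rw [PySem.Set.contains_iff, PySem.Set.mem_ofList]; exact hmem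
        simp only [h1, h2, ih]
        norm_num
      · have h1 : ur.contains r = false := by simpa using hmem
        have h2 : (PySem.Set.ofList ur).contains r = false := by
          rw [← Bool.not_eq_true, PySem.Set.contains_iff, PySem.Set.mem_ofList]; exact hmem
        by_cases hcomp : completes_alt (PySem.Set.ofList ur) r = true
        · simp only [h1, h2, hk, hcomp, ih]
          norm_num
          ring
        · have hcomp' : completes_alt (PySem.Set.ofList ur) r = false := by
            simpa using hcomp
          simp only [h1, h2, hk, hcomp', ih]
          norm_num

-- ===== VERDICT (by name: the statement is the Claim_ definition above) =====
theorem count_straight_outs_py_spec : Claim_equal_count_straight_outs_py := by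
  intro ur _
  unfold Spec_count_straight_outs_py count_straight_outs_py count_straight_outs_py_alt
  rw [foldA_eq ur _ 0]
  ring
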